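-- pv_equiv track=rewrite | github.com/mccarthurmay/CP116 | Daily/Day9/semantic.py | make_counts
-- ===== SOURCE A (Python) =====
-- def make_counts(list_of_sents):
--     word_count = {}
--     pair_count = {}
--     for sentence in list_of_sents:
--         for wordind in range(len(sentence)):
--             current = sentence[wordind]
--             if wordind < len(sentence) - 1:
--                 # get the next word in the sentence
--                 next = sentence[wordind+1]
--                 # see if we have a dictionary for the current word,
--                 # if not, make one
--                 scores_for_word = pair_count.get(current, {})
--                 # see if next appears in the dictionary for the
--                 # current word, if not return 0
--                 next_score = scores_for_word.get(next,0)
--                 # modify the score we stored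
--                 scores_for_word[next] = next_score + 1
--                 # save the original dict
--                 pair_count[current] = scores_for_word
--
--             count = word_count.get(current,0)
--             word_count[current] = count + 1
--
--     return word_count, pair_count
-- ===== SOURCE B (Python) =====
-- def make_counts(list_of_sents):
--     # Materialise the corpus once, then build each dict by dedup-and-count:
--     # keys in first-appearance order, values computed by list.count scans.
--     words = [w for sentence in list_of_sents for w in sentence]
--     pairs = [p for sentence in list_of_sents for p in zip(sentence, sentence[1:])]
--     word_count = {w: words.count(w) for w in dict.fromkeys(words)}
--     pair_count = {c: {n: pairs.count((c, n))
--                       for n in dict.fromkeys(n2 for c2, n2 in pairs if c2 == c)}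
--                   for c in dict.fromkeys(c for c, _ in pairs)}
--     return word_count, pair_count
-- ===== Notes on version B (the rewrite author's own statement) =====
-- stated objective: alternative
-- what changed: A's single interleaved loop that increments word and nested pair dicts per index is replaced by a dedup-and-count algorithm: flatten the corpus into a word list and an adjacent-pair list, deduplicate keys with dict.fromkeys in first-appearance order, and compute every count with list.count scans instead of incremental updates.
import Mathlib
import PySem

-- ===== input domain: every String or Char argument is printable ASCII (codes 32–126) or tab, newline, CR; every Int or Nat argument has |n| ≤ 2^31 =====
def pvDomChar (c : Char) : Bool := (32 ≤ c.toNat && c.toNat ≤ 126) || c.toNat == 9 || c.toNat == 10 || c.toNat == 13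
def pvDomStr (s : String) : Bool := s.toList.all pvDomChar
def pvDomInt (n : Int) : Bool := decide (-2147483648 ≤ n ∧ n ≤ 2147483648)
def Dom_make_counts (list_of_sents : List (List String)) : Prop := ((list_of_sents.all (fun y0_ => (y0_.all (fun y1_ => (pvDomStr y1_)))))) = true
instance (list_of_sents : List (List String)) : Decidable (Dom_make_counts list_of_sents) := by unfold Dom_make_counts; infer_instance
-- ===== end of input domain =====

-- B replaces A's single incremental index-driven counting loop by a dedup-and-count
-- strategy: flatten the corpus once, then build each dict from the deduplicated keys
-- with list.count scans; alternative algorithm, same return values (no mutation).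

-- ===== PORT A =====
-- A's inner loop body: one iteration of 'for wordind in range(len(sentence))'
def mcA_body (sentence : List String)
    (st : PySem.Dict String Int × PySem.Dict String (PySem.Dict String Int)) (wordind : Int) :
    PySem.Dict String Int × PySem.Dict String (PySem.Dict String Int) :=
  let current := PySem.List.pyGetD sentence wordind ""
  let st :=
    if wordind < (sentence.length : Int) - 1 then
      let next := PySem.List.pyGetD sentence (wordind + 1) ""
      let scores_for_word := st.2.getD current PySem.Dict.empty
      let scores_for_word := scores_for_word.insert next (scores_for_word.getD next 0 + 1)
      (st.1, st.2.insert current scores_for_word)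
    else st
  (st.1.insert current (st.1.getD current 0 + 1), st.2)

-- A's per-sentence loop
def mcA_sent (st : PySem.Dict String Int × PySem.Dict String (PySem.Dict String Int))
    (sentence : List String) :
    PySem.Dict String Int × PySem.Dict String (PySem.Dict String Int) :=
  (PySem.List.pyRange 0 (sentence.length : Int) 1).foldl (mcA_body sentence) st

def make_counts (list_of_sents : List (List String)) :
    (List (String × Int)) × (List (String × List (String × Int))) :=
  let res := list_of_sents.foldl mcA_sent (PySem.Dict.empty, PySem.Dict.empty)
  (res.1.items, res.2.items.map (fun p => (p.1, p.2.items)))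

-- ===== PORT B =====
def make_counts_alt (list_of_sents : List (List String)) :
    (List (String × Int)) × (List (String × List (String × Int))) :=
  let words := list_of_sents.flatMap (fun sentence => sentence)
  let pairs := list_of_sents.flatMap
    (fun sentence => sentence.zip (PySem.List.slice sentence (some 1) none))
  let word_count := (PySem.List.dedup words).map (fun w => (w, (words.count w : Int)))
  let pair_count := (PySem.List.dedup (pairs.map (fun p => p.1))).map
    (fun c => (c,
      (PySem.List.dedup ((pairs.filter (fun p => p.1 == c)).map (fun p => p.2))).map
        (fun n => (n, (pairs.count (c, n) : Int)))))
  (word_count, pair_count)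

-- ===== PRECONDITION & SPEC =====
def Spec_make_counts (list_of_sents : List (List String)) (out : (List (String × Int)) × (List (String × List (String × Int)))) : Prop := out = make_counts_alt list_of_sents
instance (list_of_sents : List (List String)) (out : (List (String × Int)) × (List (String × List (String × Int)))) : Decidable (Spec_make_counts list_of_sents out) := by unfold Spec_make_counts; infer_instance

-- ===== CLAIM (what is proved, stated in full; the proofs are below) =====
def Claim_equal_make_counts : Prop := ∀ (list_of_sents : List (List String)), Dom_make_counts list_of_sents → Spec_make_counts list_of_sents (make_counts list_of_sents)

-- ===== LEMMAS AND PROOFS =====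

-- word_count update step of A, isolated for the proof
def cntW (d : PySem.Dict String Int) (word : String) : PySem.Dict String Int :=
  d.insert word (d.getD word 0 + 1)

-- pair_count update step of A, isolated for the proof
def cntP (d : PySem.Dict String (PySem.Dict String Int)) (p : String × String) :
    PySem.Dict String (PySem.Dict String Int) :=
  d.insert p.1 ((d.getD p.1 PySem.Dict.empty).insert p.2
    ((d.getD p.1 PySem.Dict.empty).getD p.2 0 + 1))

lemma pyGetD_cons_succ (x : String) (t : List String) (k : Nat) (d : String) :
    PySem.List.pyGetD (x :: t) ((k : Int) + 1) d = PySem.List.pyGetD t (k : Int) d := by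
  rw [show ((k:Int)+1) = (((k+1:Nat)):Int) by push_cast; ring]
  rw [PySem.List.pyGetD_natCast, PySem.List.pyGetD_natCast]
  simp

lemma mcA_body_shift (x : String) (t : List String) (k : Nat)
    (st : PySem.Dict String Int × PySem.Dict String (PySem.Dict String Int)) :
    mcA_body (x :: t) st ((k : Int) + 1) = mcA_body t st (k : Int) := by
  unfold mcA_body
  have hiff : (((k:Int) + 1) < (((x :: t).length : Nat) : Int) - 1) ↔ ((k : Int) < ((t.length : Nat) : Int) - 1) := by
    simp; omega
  rw [show ((k:Int) + 1 + 1) = (((k+1:Nat)):Int) + 1 by push_cast; ring]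
  simp only [pyGetD_cons_succ, hiff]
  rw [show (((k+1:Nat)):Int) = ((k:Int)+1) by push_cast; ring]

lemma foldl_shift (x : String) (t : List String)
    (st : PySem.Dict String Int × PySem.Dict String (PySem.Dict String Int)) :
    (PySem.List.pyRange 1 (((x :: t).length : Nat) : Int)).foldl (mcA_body (x :: t)) st
      = mcA_sent st t := by
  unfold mcA_sent
  rw [PySem.List.pyRange_one, PySem.List.pyRange_one]
  have h1 : ((((x :: t).length : Nat) : Int) - 1).toNat = t.length := by simp
  have h2 : (((t.length : Nat) : Int) - 0).toNat = t.length := by simp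
  rw [h1, h2, List.foldl_map, List.foldl_map]
  apply PySem.List.foldl_congr_mem
  intro acc k _
  rw [show (1 : Int) + (k : Int) = (k : Int) + 1 by ring, mcA_body_shift, show (0 : Int) + (k : Int) = (k : Int) by ring]

lemma mcA_body_zero (x : String) (t : List String)
    (wc : PySem.Dict String Int) (pc : PySem.Dict String (PySem.Dict String Int)) :
    mcA_body (x :: t) (wc, pc) 0
      = (cntW wc x, if t = [] then pc else cntP pc (x, t.headI)) := by
  unfold mcA_body
  cases t with
  | nil => simp [cntW]
  | cons y t' =>
    have h1 : PySem.List.pyGetD (x :: y :: t') 1 "" = y := by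
      rw [show (1 : Int) = ((1 : Nat) : Int) from rfl, PySem.List.pyGetD_natCast]; rfl
    simp only [if_neg (by simp : ¬(y :: t' = [])), List.headI]
    simp [cntW, cntP, PySem.List.pyGetD_zero_cons, h1]

lemma mcA_sent_eq (s : List String) :
    ∀ (wc : PySem.Dict String Int) (pc : PySem.Dict String (PySem.Dict String Int)),
      mcA_sent (wc, pc) s = (s.foldl cntW wc, (s.zip s.tail).foldl cntP pc) := by
  induction s with
  | nil => intro wc pc; rfl
  | cons x t ih =>
    intro wc pc
    have h0 : mcA_sent (wc, pc) (x :: t)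
        = (PySem.List.pyRange 1 (((x :: t).length : Nat) : Int)).foldl (mcA_body (x :: t))
            (mcA_body (x :: t) (wc, pc) 0) := by
      unfold mcA_sent
      rw [PySem.List.pyRange_one_cons (by exact_mod_cast t.length.succ_pos), List.foldl_cons,
        zero_add]
    rw [h0, foldl_shift, mcA_body_zero]
    cases t with
    | nil => rfl
    | cons y t' => simp [ih, List.headI]

lemma outer_split (L : List (List String)) :
    ∀ (wc : PySem.Dict String Int) (pc : PySem.Dict String (PySem.Dict String Int)),
      L.foldl mcA_sent (wc, pc)
        = (L.foldl (fun d s => s.foldl cntW d) wc,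
           L.foldl (fun d s => (s.zip s.tail).foldl cntP d) pc) := by
  induction L with
  | nil => intro wc pc; rfl
  | cons s L ih =>
    intro wc pc
    simp only [List.foldl_cons, mcA_sent_eq s wc pc, ih]

-- folding sentence-by-sentence is folding over the flattened list
lemma foldl_flat {α β σ : Type} (f : σ → α → σ) (g : β → List α) (L : List β) (init : σ) :
    L.foldl (fun acc s => (g s).foldl f acc) init = (L.flatMap g).foldl f init := by
  induction L generalizing init with
  | nil => rfl
  | cons s L ih => simp [List.foldl_append, ih]

-- the getD of A's nested pair fold at key c is the inner counting fold over the nexts of c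
lemma pairFold_getD (l : List (String × String)) :
    ∀ (d : PySem.Dict String (PySem.Dict String Int)) (c : String),
      (l.foldl cntP d).getD c PySem.Dict.empty
        = ((l.filter (fun p => p.1 == c)).map (fun p => p.2)).foldl
            (fun inn n => inn.insert n (inn.getD n 0 + 1)) (d.getD c PySem.Dict.empty) := by
  induction l with
  | nil => intro d c; rfl
  | cons p l ih =>
    intro d c
    rw [List.foldl_cons, ih]
    by_cases h : p.1 = c
    · simp [h, cntP]
    · simp [h, cntP, PySem.Dict.getD_insert, Ne.symm h]

-- counting a second component among pairs whose first is c is counting the pair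
lemma count_snd_filter (l : List (String × String)) (c n : String) :
    (((l.filter (fun p => p.1 == c)).map (fun p => p.2)).count n : Int)
      = (l.count (c, n) : Int) := by
  congr 1
  induction l with
  | nil => rfl
  | cons p l ih =>
    obtain ⟨a, b⟩ := p
    by_cases ha : a = c
    · subst ha
      by_cases hb : b = n
      · subst hb; simp [ih]
      · simp [hb, ih, Prod.ext_iff]
    · simp [ha, ih, Prod.ext_iff]

-- ===== VERDICT (by name: the statement is the Claim_ definition above) =====
theorem make_counts_spec : Claim_equal_make_counts := by
  intro L _
  unfold Spec_make_counts make_counts make_counts_alt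
  rw [outer_split L PySem.Dict.empty PySem.Dict.empty]
  simp only [PySem.List.slice_from_one]
  rw [Prod.mk.injEq]
  refine ⟨?_, ?_⟩
  · -- word side
    rw [foldl_flat, show cntW = (fun (d : PySem.Dict String Int) (x : String) => d.insert x (d.getD x 0 + 1)) from rfl,
      PySem.Dict.foldl_insert_getD_add_one_eq_counter]
    rw [PySem.Dict.items_counter]
    simp [PySem.List.dedup_eq_ofList]
  · -- pair side
    rw [foldl_flat cntP (fun s => s.zip s.tail) L PySem.Dict.empty]
    have hkeys : ((L.flatMap (fun s => s.zip s.tail)).foldl cntP PySem.Dict.empty).keys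
        = PySem.Set.ofList ((L.flatMap (fun s => s.zip s.tail)).map (fun p => p.1)) := by
      rw [show cntP = (fun (d : PySem.Dict String (PySem.Dict String Int)) (p : String × String) =>
            d.insert p.1 ((d.getD p.1 PySem.Dict.empty).insert p.2
              ((d.getD p.1 PySem.Dict.empty).getD p.2 0 + 1))) from rfl,
          PySem.Dict.keys_foldl_insert_key]
      simp [PySem.Dict.keys_empty, PySem.Set.update, PySem.Set.ofList_eq_foldl]
    have hnodup : ((L.flatMap (fun s => s.zip s.tail)).foldl cntP PySem.Dict.empty).keys.Nodup := by
      rw [hkeys]; exact PySem.Set.nodup_ofList _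
    rw [PySem.Dict.items_eq_map_keys _ hnodup PySem.Dict.empty, hkeys, List.map_map]
    simp only [PySem.List.dedup_eq_ofList]
    apply List.map_congr_left
    intro c _
    simp only [Function.comp]
    congr 1
    rw [pairFold_getD, PySem.Dict.getD_empty,
      PySem.Dict.foldl_insert_getD_add_one_eq_counter, PySem.Dict.items_counter]
    apply List.map_congr_left
    intro n _
    rw [count_snd_filter]
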